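-- pv_equiv track=rewrite | github.com/manas-17045/LeetcodeSolutions | Leetcode 1601-1700/1649/1649_1.py | createSortedArray
-- ===== SOURCE A (Python) =====
-- def createSortedArray(instructions: list[int]) -> int:
--     """
--     Calculates the minimum cost to create a sorted array from a given list of instructions.
--
--     Args:
--         instructions (list[int]): A list of integers representing the numbers to be inserted.
--     Returns:
--         int: The minimum cost to create the sorted array, modulo 10^9 + 7.
--     """
--     modValue = 10 ** 9 + 7
--     size = 100002
--     fenwickTree = [0] * size
--
--     def update(index: int, value: int):
--         while index < size:
--             fenwickTree[index] += value
--             index += index & (-index)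
--
--     def query(index: int) -> int:
--         total = 0
--         while index > 0:
--             total += fenwickTree[index]
--             index -= index & (-index)
--         return total
--
--     totalCost = 0
--     for i, num in enumerate(instructions):
--         countLess = query(num - 1)
--         countGreater = i - query(num)
--
--         cost = min(countLess, countGreater)
--         totalCost = (totalCost + cost) % modValue
--
--         update(num, 1)
--
--     return totalCost
-- ===== SOURCE B (Python) =====
-- def createSortedArray(instructions: list[int]) -> int:
--     """Minimum cost to build a sorted array: direct prefix counting instead of a Fenwick tree."""
--     MOD = 10 ** 9 + 7
--     total = 0
--     prev = []
--     for num in instructions: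
--         less = sum(1 for x in prev if x < num)
--         greater = sum(1 for x in prev if x > num)
--         total = (total + min(less, greater)) % MOD
--         prev.append(num)
--     return total
-- ===== Notes on version B (the rewrite author's own statement) =====
-- stated objective: simpler
-- what changed: Replaced A's 100002-slot Fenwick tree with nested update/query helpers by a direct scan of the already-inserted prefix that counts smaller and greater elements per step; no tree state at all.
import Mathlib
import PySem

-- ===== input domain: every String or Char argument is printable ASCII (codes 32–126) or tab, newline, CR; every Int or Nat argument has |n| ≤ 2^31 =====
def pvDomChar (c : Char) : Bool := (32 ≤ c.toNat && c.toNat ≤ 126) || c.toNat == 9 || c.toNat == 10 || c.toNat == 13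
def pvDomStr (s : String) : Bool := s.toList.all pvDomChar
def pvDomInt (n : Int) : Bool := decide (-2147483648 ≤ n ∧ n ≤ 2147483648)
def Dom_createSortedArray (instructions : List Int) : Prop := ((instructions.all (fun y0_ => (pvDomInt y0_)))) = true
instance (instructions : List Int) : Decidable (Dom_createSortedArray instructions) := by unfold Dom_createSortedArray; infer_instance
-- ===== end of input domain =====

-- B replaces A's Fenwick tree with direct counting of smaller/greater prefix elements: simpler, no tree state.
-- (A's in-place mutation of its local fenwickTree is internal; the equivalence is about the return value.)

-- ===== PORT A =====
-- A's Fenwick tree (a Python list of 100002 ints) is modeled as a function Int → Int;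
-- its two while-loops are fuel recursions (fuel 100002 is ample: on Pre_ inputs the
-- update index strictly increases to 100002 and the query index strictly decreases to 0).
def pvLowbit (i : Int) : Int := Int.land i (-i)

def pvUpdate (fuel : Nat) (t : Int → Int) (index value : Int) : Int → Int :=
  match fuel with
  | 0 => t
  | f+1 =>
    if index < 100002 then
      pvUpdate f (fun j => if j = index then t index + value else t j) (index + pvLowbit index) value
    else t

def pvQuery (fuel : Nat) (t : Int → Int) (index total : Int) : Int :=
  match fuel with
  | 0 => total
  | f+1 => if 0 < index then pvQuery f t (index - pvLowbit index) (total + t index) else total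

def pvStepA (s : Int × Int × (Int → Int)) (num : Int) : Int × Int × (Int → Int) :=
  let countLess := pvQuery 100002 s.2.2 (num - 1) 0
  let countGreater := s.1 - pvQuery 100002 s.2.2 num 0
  let cost := min countLess countGreater
  (s.1 + 1, PySem.Int.mod (s.2.1 + cost) (10^9+7), pvUpdate 100002 s.2.2 num 1)

def createSortedArray (instructions : List Int) : Int :=
  (instructions.foldl pvStepA (0, 0, fun _ => 0)).2.1

-- ===== PORT B =====
def pvStepB (s : Int × List Int) (num : Int) : Int × List Int :=
  let less : Int := ((s.2.filter (fun x => decide (x < num))).length : Int)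
  let greater : Int := ((s.2.filter (fun x => decide (num < x))).length : Int)
  (PySem.Int.mod (s.1 + min less greater) (10^9+7), s.2 ++ [num])

def createSortedArray_alt (instructions : List Int) : Int :=
  (instructions.foldl pvStepB (0, [])).1

-- ===== PRECONDITION & SPEC =====
-- Pre_ keeps every element in 1..100001 (the Fenwick tree's index range): outside it A never
-- returns — elements ≤ 0 make A's update loop spin forever and elements ≥ 100002 or ≤ -100003
-- raise IndexError — so Pre_ excludes no input on which A returns.
def Pre_createSortedArray (instructions : List Int) : Prop :=
  ∀ x ∈ instructions, 1 ≤ x ∧ x ≤ 100001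
instance (instructions : List Int) : Decidable (Pre_createSortedArray instructions) := by
  unfold Pre_createSortedArray; infer_instance

def pvWitness_createSortedArray : List Int := [1, 5, 6, 2]

def Spec_createSortedArray (instructions : List Int) (out : Int) : Prop := out = createSortedArray_alt instructions
instance (instructions : List Int) (out : Int) : Decidable (Spec_createSortedArray instructions out) := by unfold Spec_createSortedArray; infer_instance

-- ===== CLAIM (what is proved, stated in full; the proofs are below) =====
def Claim_equal_createSortedArray : Prop := ∀ (instructions : List Int), Dom_createSortedArray instructions → Pre_createSortedArray instructions → Spec_createSortedArray instructions (createSortedArray instructions)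

-- ===== LEMMAS AND PROOFS =====

-- ---- the lowest-set-bit identity i &&& (-i) ----

lemma pv_pred_div_eq (p m : Nat) (hp : 0 < p) (h : ¬ p ∣ m) : (m - 1) / p = m / p := by
  have hm := Nat.div_add_mod m p
  have hb : m % p ≠ 0 := fun h0 => h (Nat.dvd_of_mod_eq_zero h0)
  have hblt : m % p < p := Nat.mod_lt _ hp
  have h1 : m - 1 = p * (m / p) + (m % p - 1) := by omega
  calc (m - 1) / p = (p * (m / p) + (m % p - 1)) / p := by rw [← h1]
    _ = m / p + (m % p - 1) / p := Nat.mul_add_div hp _ _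
    _ = m / p := by simp [Nat.div_eq_of_lt (show m % p - 1 < p by omega)]

lemma pv_ldiff_pow (j q : Nat) :
    Nat.ldiff (2^(j+1)*q + 2^j) ((2^(j+1)*q + 2^j) - 1) = 2^j := by
  set m := 2^(j+1)*q + 2^j with hm
  have hj : 0 < (2:Nat)^j := Nat.two_pow_pos _
  apply Nat.eq_of_testBit_eq
  intro i
  rw [Nat.testBit_ldiff, Nat.testBit_two_pow]
  by_cases hij : i = j
  · subst hij
    have hfac : m = 2^i * (2*q+1) := by rw [hm]; ring
    have h1 : m / 2^i % 2 = 1 := by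
      rw [hfac, Nat.mul_div_cancel_left _ hj]; omega
    have h2 : (m - 1) / 2^i % 2 = 0 := by
      have hfac' : m - 1 = 2^i * (2*q) + (2^i - 1) := by
        have : m = 2^i * (2*q) + 2^i := by rw [hm]; ring
        omega
      rw [hfac', Nat.mul_add_div hj, Nat.div_eq_of_lt (by omega)]
      omega
    simp [Nat.testBit_eq_decide_div_mod_eq, h1, h2]
  rcases Nat.lt_or_ge i j with hlt | hge
  · -- i < j : bit i of m is 0
    have e1 : (2:Nat)^(j+1) = 2^i * 2^(j+1-i) := by rw [← pow_add]; congr 1; omega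
    have e2 : (2:Nat)^j = 2^i * 2^(j-i) := by rw [← pow_add]; congr 1; omega
    have hfac : m = 2^i * (2^(j+1-i)*q + 2^(j-i)) := by rw [hm, e1, e2]; ring
    have e3 : (2:Nat)^(j+1-i) = 2 * 2^(j-i) := by rw [← pow_succ']; congr 1; omega
    have e4 : (2:Nat)^(j-i) = 2 * 2^(j-i-1) := by rw [← pow_succ']; congr 1; omega
    have hev : m / 2^i % 2 = 0 := by
      rw [hfac, Nat.mul_div_cancel_left _ (Nat.two_pow_pos _)]
      have : 2^(j+1-i)*q + 2^(j-i) = 2 * (2^(j-i)*q + 2^(j-i-1)) := by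
        rw [e3]
        nth_rewrite 2 [e4]
        ring
      rw [this, Nat.mul_mod_right]
    have hne : ¬ j = i := by omega
    simp [Nat.testBit_eq_decide_div_mod_eq, hev, hne]
  · -- j < i : bits of m and m-1 agree
    have hji : j < i := by omega
    have hnd : ¬ 2^i ∣ m := by
      intro hd
      have h2 : 2^(j+1) ∣ m := dvd_trans (pow_dvd_pow 2 (by omega)) hd
      obtain ⟨c, hc⟩ := h2
      have : 2^j * (2*q+1) = 2^j * (2*c) := by
        rw [show 2^j * (2*q+1) = m by rw [hm]; ring, hc, pow_succ]; ring
      have := Nat.eq_of_mul_eq_mul_left hj this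
      omega
    have heq := pv_pred_div_eq (2^i) m (Nat.two_pow_pos _) hnd
    have hne : ¬ j = i := by omega
    simp [Nat.testBit_eq_decide_div_mod_eq, heq, hne]

-- characterization of pvLowbit on positives
lemma pvLowbit_spec (n : Int) (h : 0 < n) :
    ∃ j : Nat, pvLowbit n = 2^j ∧ ((2:Int)^j ∣ n) ∧ ¬((2:Int)^(j+1) ∣ n) := by
  obtain ⟨m, rfl⟩ : ∃ m : Nat, n = (m : Int) := ⟨n.toNat, by omega⟩
  have hm : 0 < m := by omega
  obtain ⟨j, w, hw2, hmw⟩ := Nat.exists_eq_pow_mul_and_not_dvd (n := m) (by omega) 2 (by norm_num)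
  obtain ⟨q, hq⟩ : ∃ q, w = 2*q + 1 := ⟨w / 2, by omega⟩
  refine ⟨j, ?_, ?_, ?_⟩
  · have hneg : -((m : Int)) = Int.negSucc (m - 1) := by omega
    have hland : pvLowbit ((m : Int)) = Int.ofNat (Nat.ldiff m (m - 1)) := by
      unfold pvLowbit; rw [hneg]; rfl
    have hrepr : m = 2^(j+1)*q + 2^j := by rw [hmw, hq]; ring
    rw [hland, hrepr, pv_ldiff_pow j q]
    simp [Int.ofNat_eq_natCast]
  · exact ⟨(w : Int), by exact_mod_cast hmw⟩
  · intro hd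
    have : (2:Nat)^(j+1) ∣ m := by exact_mod_cast hd
    obtain ⟨c, hc⟩ := this
    have hj : 0 < (2:Nat)^j := Nat.two_pow_pos _
    have : 2^j * w = 2^j * (2*c) := by rw [← hmw, hc, pow_succ]; ring
    have := Nat.eq_of_mul_eq_mul_left hj this
    omega

-- L0: positivity and bound
lemma pvLowbit_pos (n : Int) (h : 0 < n) : 0 < pvLowbit n ∧ pvLowbit n ≤ n := by
  obtain ⟨j, hl, hd, -⟩ := pvLowbit_spec n h
  have := Int.le_of_dvd h hd
  have : (0:Int) < 2^j := by positivity
  constructor <;> [skip; skip] <;> rw [hl] <;> omega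

-- L2: ascending one step can only move the "responsibility left end" down
lemma pvLowbit_ascend (a : Int) (h : 0 < a) :
    (a + pvLowbit a) - pvLowbit (a + pvLowbit a) ≤ a - pvLowbit a := by
  obtain ⟨j, hl, hd, hnd⟩ := pvLowbit_spec a h
  obtain ⟨w, hw⟩ := hd
  have hwodd : ∃ c, w = 2*c + 1 := by
    rcases Int.even_or_odd w with ⟨c, hc⟩ | ⟨c, hc⟩
    · exact absurd ⟨c, by rw [hw, hc, pow_succ]; ring⟩ hnd
    · exact ⟨c, by omega⟩
  obtain ⟨c, rfl⟩ := hwodd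
  have hdvd2 : (2:Int)^(j+1) ∣ a + pvLowbit a := ⟨c + 1, by rw [hl, hw, pow_succ]; ring⟩
  have hpos : 0 < a + pvLowbit a := by
    have := (pvLowbit_pos a h).1; omega
  obtain ⟨s, hl2, hd2, hnd2⟩ := pvLowbit_spec _ hpos
  have hjs : j + 1 ≤ s := by
    by_contra hc2
    exact hnd2 (dvd_trans (pow_dvd_pow 2 (by omega)) hdvd2)
  have hle : (2:Int)^(j+1) ≤ 2^s := pow_le_pow_right₀ (by norm_num) hjs
  have hpow : (2:Int)^(j+1) = 2 * 2^j := by rw [pow_succ]; ring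
  rw [hl2, hl]
  omega

-- L1: from a strictly inside d's responsibility interval, one ascending step stays ≤ d
lemma pvLowbit_step_le (a d : Int) (ha : 0 < a) (had : a < d)
    (hres : d - pvLowbit d < a) : a + pvLowbit a ≤ d := by
  obtain ⟨s, hls, hds, hnds⟩ := pvLowbit_spec d (by omega)
  obtain ⟨j, hlj, hdj, hndj⟩ := pvLowbit_spec a ha
  obtain ⟨w, hw⟩ := hds
  have hwodd : ∃ q, w = 2*q + 1 := by
    rcases Int.even_or_odd w with ⟨q, hq⟩ | ⟨q, hq⟩
    · exact absurd ⟨q, by rw [hw, hq, pow_succ]; ring⟩ hnds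
    · exact ⟨q, by omega⟩
  obtain ⟨q, rfl⟩ := hwodd
  set b : Int := d - 2^s with hb
  have hbdvd : (2:Int)^(s+1) ∣ b := ⟨q, by rw [hb, hw, pow_succ]; ring⟩
  set r : Int := a - b with hr
  have hrpos : 0 < r := by rw [hr, hb]; rw [hls] at hres; omega
  have hrlt : r < 2^s := by rw [hr, hb]; omega
  -- j ≤ s
  have hjle : j ≤ s := by
    by_contra hc2
    have hdvda : (2:Int)^(s+1) ∣ a := dvd_trans (pow_dvd_pow 2 (by omega)) hdj
    have hdvdr : (2:Int)^(s+1) ∣ r := by rw [hr]; exact dvd_sub hdvda hbdvd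
    have := Int.le_of_dvd hrpos hdvdr
    have hle : (2:Int)^s ≤ 2^(s+1) := pow_le_pow_right₀ (by norm_num) (by omega)
    omega
  have hbj : (2:Int)^j ∣ b := dvd_trans (pow_dvd_pow 2 (by omega)) hbdvd
  have hrdj : (2:Int)^j ∣ r := by rw [hr]; exact dvd_sub hdj hbj
  have hrndj : ¬((2:Int)^(j+1) ∣ r) := by
    intro hd2
    have hbj1 : (2:Int)^(j+1) ∣ b := dvd_trans (pow_dvd_pow 2 (by omega)) hbdvd
    have hab : a = b + r := by rw [hr]; ring
    exact hndj (hab ▸ dvd_add hbj1 hd2)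
  -- j < s
  have hjlt : j < s := by
    rcases Nat.lt_or_ge j s with h | h
    · exact h
    · have hjs : j = s := by omega
      subst hjs
      have := Int.le_of_dvd hrpos hrdj
      omega
  -- r = 2^j * odd, hence r + 2^j ≤ 2^s
  obtain ⟨u, hu⟩ := hrdj
  have huodd : ∃ c, u = 2*c + 1 := by
    rcases Int.even_or_odd u with ⟨c, hc⟩ | ⟨c, hc⟩
    · exact absurd ⟨c, by rw [hu, hc, pow_succ]; ring⟩ hrndj
    · exact ⟨c, by omega⟩
  obtain ⟨c, rfl⟩ := huodd
  have hpowsplit : (2:Int)^s = 2^j * 2^(s-j) := by rw [← pow_add]; congr 1; omega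
  have hpows2 : (2:Int)^(s-j) = 2 * 2^(s-j-1) := by rw [← pow_succ']; congr 1; omega
  have hjpos : (0:Int) < 2^j := by positivity
  have hcbound : 2*c+1 < 2^(s-j) := by
    have : (2:Int)^j * (2*c+1) < 2^j * 2^(s-j) := by rw [← hu, ← hpowsplit]; exact hrlt
    exact lt_of_mul_lt_mul_left this (by positivity)
  have e5 : (2:Int)^j * (2*c+2) = r + 2^j := by rw [hu]; ring
  have hfin : r + 2^j ≤ 2^s := by
    have h1 : (2:Int)*c+2 ≤ 2^(s-j) := by omega
    have h2 : (2:Int)^j * (2*c+2) ≤ 2^j * 2^(s-j) :=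
      mul_le_mul_of_nonneg_left h1 (by positivity)
    rw [e5, ← hpowsplit] at h2
    exact h2
  rw [hlj]
  have hab : a = b + r := by rw [hr]; ring
  omega

-- ---- the update chain ----

def pvInChain (fuel : Nat) (a d : Int) : Bool :=
  match fuel with
  | 0 => false
  | f+1 => if a < 100002 then (a == d || pvInChain f (a + pvLowbit a) d) else false

-- CH1: chain invariant
lemma pvInChain_inv (f : Nat) (a d : Int) (ha : 0 < a) (h : pvInChain f a d = true) :
    a ≤ d ∧ d - pvLowbit d ≤ a - pvLowbit a := by
  induction f generalizing a with
  | zero => simp [pvInChain] at h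
  | succ f ih =>
    rw [pvInChain] at h
    split at h
    · rcases Bool.or_eq_true_iff.mp h with h1 | h1
      · have : a = d := by exact_mod_cast (beq_iff_eq).mp h1
        subst this; exact ⟨le_refl _, le_refl _⟩
      · have hlb := (pvLowbit_pos a ha).1
        have := ih (a + pvLowbit a) (by omega) h1
        have hasc := pvLowbit_ascend a ha
        omega
    · simp at h

-- CH2: reachability
lemma pvInChain_reach (f : Nat) (a d : Int) (ha : 0 < a) (had : a ≤ d)
    (hres : d - pvLowbit d < a) (hd : d < 100002) (hf : (d - a).toNat < f) :
    pvInChain f a d = true := by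
  induction f generalizing a with
  | zero => omega
  | succ f ih =>
    rw [pvInChain]
    rw [if_pos (by omega)]
    rcases eq_or_lt_of_le had with rfl | hlt
    · simp
    · have hstep := pvLowbit_step_le a d ha hlt hres
      have hlb := (pvLowbit_pos a ha).1
      have := ih (a + pvLowbit a) (by omega) hstep (by omega) (by omega)
      simp [this]

-- pvQuery: accumulator extraction; zero tree
lemma pvQuery_acc (f : Nat) (t : Int → Int) (k acc : Int) :
    pvQuery f t k acc = acc + pvQuery f t k 0 := by
  induction f generalizing k acc with
  | zero => simp [pvQuery]
  | succ f ih =>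
    rw [pvQuery, pvQuery]
    split
    · rw [ih _ (acc + t k), ih _ (0 + t k)]; ring
    · ring

lemma pvQuery_zero (f : Nat) (k acc : Int) :
    pvQuery f (fun _ => 0) k acc = acc := by
  induction f generalizing k acc with
  | zero => rfl
  | succ f ih =>
    rw [pvQuery]
    split <;> simp [ih]

-- U: pointwise description of an update
lemma pvUpdate_get (f : Nat) (t : Int → Int) (a v d : Int) (ha : 0 < a) :
    pvUpdate f t a v d = t d + (if pvInChain f a d then v else 0) := by
  induction f generalizing a t with
  | zero => simp [pvUpdate, pvInChain]
  | succ f ih =>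
    rw [pvUpdate, pvInChain]
    split
    · have hlb := (pvLowbit_pos a ha).1
      rw [ih _ _ (by omega)]
      by_cases hda : d = a
      · subst hda
        have hnot : pvInChain f (d + pvLowbit d) d = false := by
          by_contra hc
          have hc' : pvInChain f (d + pvLowbit d) d = true := by
            cases h : pvInChain f (d + pvLowbit d) d with
            | true => rfl
            | false => exact absurd h hc
          have := (pvInChain_inv f _ d (by omega) hc').1
          omega
        simp [hnot]
      · simp [hda, Ne.symm hda]
    · simp

-- CORE: one update shifts every admissible query by the membership indicator
lemma pvQuery_update (f : Nat) (num : Int) (hn1 : 0 < num) (hn2 : num ≤ 100001) :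
    ∀ (k : Int) (t : Int → Int) (acc : Int), 0 ≤ k → k ≤ 100001 → k.toNat < f →
    pvQuery f (pvUpdate 100002 t num 1) k acc
      = pvQuery f t k acc + (if num ≤ k then 1 else 0) := by
  induction f with
  | zero => intro k t acc h1 h2 h3; omega
  | succ f ih =>
    intro k t acc h1 h2 h3
    rw [pvQuery, pvQuery]
    by_cases hk : 0 < k
    · rw [if_pos hk, if_pos hk]
      have hlbk := (pvLowbit_pos k hk).1
      have hlbk2 := (pvLowbit_pos k hk).2
      set k' := k - pvLowbit k with hk'
      have hu := pvUpdate_get 100002 t num 1 k hn1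
      have hIH := ih k' t 0 (by omega) (by omega) (by omega)
      rw [pvQuery_acc f _ k', pvQuery_acc f t k', hIH, hu]
      by_cases hcase1 : num ≤ k'
      · -- k is NOT in the chain (its responsibility interval is below num's position)
        have hnot : pvInChain 100002 num k = false := by
          by_contra hc
          have hc' : pvInChain 100002 num k = true := by
            cases h : pvInChain 100002 num k with
            | true => rfl
            | false => exact absurd h hc
          have hlbn := (pvLowbit_pos num hn1).1
          have := (pvInChain_inv 100002 num k hn1 hc').2
          omega
        rw [hnot]
        have : num ≤ k := by omega
        simp only [if_pos hcase1, if_pos this, Bool.false_eq_true, if_false]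
        ring
      · by_cases hcase2 : num ≤ k
        · -- k IS in the chain
          have hin : pvInChain 100002 num k = true :=
            pvInChain_reach 100002 num k hn1 hcase2 (by omega) (by omega) (by omega)
          rw [hin]
          simp only [if_pos hcase2, if_neg hcase1, if_true]
          ring
        · -- k < num : not in chain (chain elements are ≥ num)
          have hnot : pvInChain 100002 num k = false := by
            by_contra hc
            have hc' : pvInChain 100002 num k = true := by
              cases h : pvInChain 100002 num k with
              | true => rfl
              | false => exact absurd h hc
            have := (pvInChain_inv 100002 num k hn1 hc').1
            omega
          rw [hnot]
          simp only [if_neg hcase1, if_neg hcase2, Bool.false_eq_true, if_false]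
          ring
    · rw [if_neg hk, if_neg hk, if_neg (by omega)]
      ring

-- the tree built from a prefix of inserted values
def pvTreeOf (prev : List Int) : Int → Int :=
  prev.foldl (fun t num => pvUpdate 100002 t num 1) (fun _ => 0)

-- M: a query on the built tree counts the elements ≤ k
lemma pvQuery_treeOf (prev : List Int) (k : Int)
    (hp : ∀ x ∈ prev, 1 ≤ x ∧ x ≤ 100001) (h1 : 0 ≤ k) (h2 : k ≤ 100001) :
    pvQuery 100002 (pvTreeOf prev) k 0
      = ((prev.filter (fun x => decide (x ≤ k))).length : Int) := by
  induction prev using List.reverseRecOn with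
  | nil => simp [pvTreeOf, pvQuery_zero]
  | append_singleton p num ih =>
    have hnum := hp num (by simp)
    have hp' : ∀ x ∈ p, 1 ≤ x ∧ x ≤ 100001 := fun x hx => hp x (by simp [hx])
    have htree : pvTreeOf (p ++ [num]) = pvUpdate 100002 (pvTreeOf p) num 1 := by
      rw [pvTreeOf, List.foldl_append]; rfl
    rw [htree, pvQuery_update 100002 num (by omega) (by omega) k (pvTreeOf p) 0 h1 h2 (by omega),
        ih hp', List.filter_append]
    simp only [List.length_append]
    by_cases hle : num ≤ k <;> simp [hle]

-- counting complements: ≤ k and > k partition the list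
lemma pv_count_split (l : List Int) (k : Int) :
    (l.filter (fun x => decide (x ≤ k))).length
      + (l.filter (fun x => decide (k < x))).length = l.length := by
  induction l with
  | nil => rfl
  | cons x l ih =>
    by_cases h : x ≤ k
    · simp [h, not_lt.mpr h]; omega
    · simp [h, lt_of_not_ge h]; omega

-- MAIN invariant: the two folds agree
lemma pv_main (rest : List Int) : ∀ (prev : List Int) (total : Int),
    (∀ x ∈ rest, 1 ≤ x ∧ x ≤ 100001) → (∀ x ∈ prev, 1 ≤ x ∧ x ≤ 100001) →
    (rest.foldl pvStepA ((prev.length : Int), total, pvTreeOf prev)).2.1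
      = (rest.foldl pvStepB (total, prev)).1 := by
  induction rest with
  | nil => intro prev total _ _; rfl
  | cons num rest ih =>
    intro prev total hrest hprev
    have hnum := hrest num (by simp)
    have hrest' : ∀ x ∈ rest, 1 ≤ x ∧ x ≤ 100001 := fun x hx => hrest x (by simp [hx])
    have hprev' : ∀ x ∈ prev ++ [num], 1 ≤ x ∧ x ≤ 100001 := by
      intro x hx
      rcases List.mem_append.mp hx with h | h
      · exact hprev x h
      · simp at h; subst h; exact hnum
    -- countLess
    have hless : pvQuery 100002 (pvTreeOf prev) (num - 1) 0
        = ((prev.filter (fun x => decide (x < num))).length : Int) := by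
      rw [pvQuery_treeOf prev (num - 1) hprev (by omega) (by omega)]
      congr 2
      apply List.filter_congr
      intro x _
      simp only [decide_eq_decide]
      omega
    -- countGreater
    have hgreat : (prev.length : Int) - pvQuery 100002 (pvTreeOf prev) num 0
        = ((prev.filter (fun x => decide (num < x))).length : Int) := by
      rw [pvQuery_treeOf prev num hprev (by omega) (by omega)]
      have := pv_count_split prev num
      omega
    simp only [List.foldl_cons]
    have hstepA : pvStepA ((prev.length : Int), total, pvTreeOf prev) num
        = ((prev.length : Int) + 1,
           PySem.Int.mod (total + min ((prev.filter (fun x => decide (x < num))).length : Int)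
                                      ((prev.filter (fun x => decide (num < x))).length : Int)) (10^9+7),
           pvUpdate 100002 (pvTreeOf prev) num 1) := by
      simp only [pvStepA, hless, hgreat]
    have hstepB : pvStepB (total, prev) num
        = (PySem.Int.mod (total + min ((prev.filter (fun x => decide (x < num))).length : Int)
                                      ((prev.filter (fun x => decide (num < x))).length : Int)) (10^9+7),
           prev ++ [num]) := by
      simp only [pvStepB]
    rw [hstepA, hstepB]
    have hlen : (prev.length : Int) + 1 = ((prev ++ [num]).length : Int) := by
      simp
    have htree : pvUpdate 100002 (pvTreeOf prev) num 1 = pvTreeOf (prev ++ [num]) := by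
      simp [pvTreeOf, List.foldl_append]
    rw [hlen, htree]
    exact ih (prev ++ [num]) _ hrest' hprev'

-- ===== VERDICT (by name: the statement is the Claim_ definition above) =====
theorem createSortedArray_spec : Claim_equal_createSortedArray := by
  intro xs _ hpre
  unfold Spec_createSortedArray createSortedArray createSortedArray_alt
  have h0 : ((0:Int), (0:Int), (fun _ => (0:Int)))
      = (((List.length ([] : List Int) : Int)), (0:Int), pvTreeOf []) := by
    simp [pvTreeOf]
  rw [h0]
  exact pv_main xs [] 0 hpre (by simp)
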